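-- pv_equiv track=rewrite | github.com/lusccc/heu-thesis-word-assistant | smart_quotes_cn.py | convert_quotes_in_plain_text
-- ===== SOURCE A (Python) =====
-- def is_escaped(text: str, index: int) -> bool:
--     backslash_count = 0
--     j = index - 1
--     while j >= 0 and text[j] == "\\":
--         backslash_count += 1
--         j -= 1
--     return backslash_count % 2 == 1
--
-- def convert_quotes_in_plain_text(text: str, is_open_quote: bool) -> tuple[str, bool]:
--     result: list[str] = []
--     for i, ch in enumerate(text):
--         if ch != '"' or is_escaped(text, i):
--             result.append(ch)
--             continue
--
--         result.append("“" if is_open_quote else "”")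
--         is_open_quote = not is_open_quote
--     return "".join(result), is_open_quote
-- ===== SOURCE B (Python) =====
-- def convert_quotes_in_plain_text(text: str, is_open_quote: bool) -> tuple[str, bool]:
--     parts = text.split('"')
--     out = [parts[0]]
--     for i in range(1, len(parts)):
--         prev = parts[i - 1]
--         if (len(prev) - len(prev.rstrip("\\"))) % 2 == 1:
--             out.append('"')
--         else:
--             out.append("\u201c" if is_open_quote else "\u201d")
--             is_open_quote = not is_open_quote
--         out.append(parts[i])
--     return "".join(out), is_open_quote
-- ===== Notes on version B (the rewrite author's own statement) =====
-- stated objective: faster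
-- what changed: B splits the text on '"' once and walks the quote-free segments, deciding each quote from the trailing-backslash run of the previous segment, instead of A's per-character loop that rescans backwards from every quote.
import Mathlib
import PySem

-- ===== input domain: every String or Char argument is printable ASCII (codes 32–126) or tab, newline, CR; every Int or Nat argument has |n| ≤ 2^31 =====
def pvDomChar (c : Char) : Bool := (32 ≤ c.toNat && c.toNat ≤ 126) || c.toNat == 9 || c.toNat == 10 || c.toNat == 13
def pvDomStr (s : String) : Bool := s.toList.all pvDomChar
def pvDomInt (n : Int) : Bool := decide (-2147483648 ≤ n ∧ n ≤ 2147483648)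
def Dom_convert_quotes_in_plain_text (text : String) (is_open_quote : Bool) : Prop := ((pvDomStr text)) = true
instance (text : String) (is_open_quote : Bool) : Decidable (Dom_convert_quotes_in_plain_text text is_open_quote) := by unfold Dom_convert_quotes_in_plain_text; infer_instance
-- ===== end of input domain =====

-- B splits the text on '"' once and decides each quote from the trailing-backslash run of the
-- previous segment, instead of A's per-character loop that rescans backwards from every quote.

-- ===== PORT A =====
-- while j >= 0 and text[j] == '\\': count += 1; j -= 1  (argument is j+1, 0 = loop exit at j < 0)
def pvBackslashRun (text : List Char) : Nat → Nat
  | 0 => 0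
  | j + 1 => if text.getD j ' ' == '\\' then pvBackslashRun text j + 1 else 0

def pvIsEscaped (text : List Char) (index : Nat) : Bool :=
  pvBackslashRun text index % 2 == 1

-- the for-loop over enumerate(text): i is the current index into the full text
def pvALoop (full : List Char) : List Char → Nat → Bool → List Char × Bool
  | [], _, q => ([], q)
  | ch :: rest, i, q =>
    if (ch != '"') || pvIsEscaped full i then
      let (r, q') := pvALoop full rest (i + 1) q
      (ch :: r, q')
    else
      let (r, q') := pvALoop full rest (i + 1) (!q)
      ((if q then '“' else '”') :: r, q')

def convert_quotes_in_plain_text (text : String) (is_open_quote : Bool) : String × Bool :=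
  let (r, q) := pvALoop text.toList text.toList 0 is_open_quote
  (String.mk r, q)

-- ===== PORT B =====
-- hand port (exact) of len(prev) - len(prev.rstrip("\\")): the trailing-backslash run length
def pvTrailBS (s : List Char) : Nat := (s.reverse.takeWhile (· == '\\')).length

-- the for-loop over range(1, len(parts)): prev = parts[i-1], seg = parts[i]
def pvBParts : List Char → List (List Char) → Bool → List Char × Bool
  | _, [], q => ([], q)
  | prev, seg :: rest, q =>
    if pvTrailBS prev % 2 == 1 then
      let (r, q') := pvBParts seg rest q
      ('"' :: (seg ++ r), q')
    else
      let (r, q') := pvBParts seg rest (!q)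
      ((if q then '“' else '”') :: (seg ++ r), q')

def convert_quotes_in_plain_text_alt (text : String) (is_open_quote : Bool) : String × Bool :=
  match PySem.Chars.splitOn text.toList ['"'] with
  | [] => (String.mk [], is_open_quote)  -- unreachable: str.split always yields at least one part
  | p0 :: rest =>
    let (r, q') := pvBParts p0 rest is_open_quote
    (String.mk (p0 ++ r), q')

-- ===== PRECONDITION & SPEC =====
def Spec_convert_quotes_in_plain_text (text : String) (is_open_quote : Bool) (out : String × Bool) : Prop := out = convert_quotes_in_plain_text_alt text is_open_quote
instance (text : String) (is_open_quote : Bool) (out : String × Bool) : Decidable (Spec_convert_quotes_in_plain_text text is_open_quote out) := by unfold Spec_convert_quotes_in_plain_text; infer_instance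

-- ===== CLAIM (what is proved, stated in full; the proofs are below) =====
def Claim_equal_convert_quotes_in_plain_text : Prop := ∀ (text : String) (is_open_quote : Bool), Dom_convert_quotes_in_plain_text text is_open_quote → Spec_convert_quotes_in_plain_text text is_open_quote (convert_quotes_in_plain_text text is_open_quote)

-- ===== LEMMAS AND PROOFS =====

-- intermediate single-pass form: bs = length of the backslash run just before the current char
def pvBLoop : List Char → Nat → Bool → List Char × Bool
  | [], _, q => ([], q)
  | ch :: rest, bs, q =>
    if ch = '"' ∧ bs % 2 = 0 then
      let (r, q') := pvBLoop rest 0 (!q)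
      ((if q then '“' else '”') :: r, q')
    else
      let (r, q') := pvBLoop rest (if ch = '\\' then bs + 1 else 0) q
      (ch :: r, q')

-- reference split: segments of l between the '"' characters
def pvSplit : List Char → List (List Char)
  | [] => [[]]
  | c :: rest =>
    if c = '"' then [] :: pvSplit rest
    else match pvSplit rest with
      | p :: ps => (c :: p) :: ps
      | [] => [[c]]

theorem pvSplit_ne_nil (l : List Char) : pvSplit l ≠ [] := by
  cases l with
  | nil => simp [pvSplit]
  | cons c rest =>
    simp only [pvSplit]
    split
    · simp
    · split <;> simp

-- the fuel loop of PySem.Chars.splitOn, for the one-character separator '"'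
theorem pvSplitOn_go (l : List Char) :
    ∀ (fuel : Nat) (cur : List Char) (acc : List (List Char)), l.length < fuel →
      PySem.Chars.splitOn.go ['"'] fuel l cur acc
        = acc.reverse ++ (match pvSplit l with
            | p :: ps => (cur.reverse ++ p) :: ps
            | [] => [cur.reverse]) := by
  induction l with
  | nil =>
    intro fuel cur acc hf
    cases fuel with
    | zero => omega
    | succ f => simp [PySem.Chars.splitOn.go, pvSplit]
  | cons c rest ih =>
    intro fuel cur acc hf
    cases fuel with
    | zero => omega
    | succ f =>
      by_cases hc : c = '"'
      · subst hc
        have hpre : List.isPrefixOf ['"'] ('"' :: rest) = true := by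
          simp [List.isPrefixOf]
        rw [PySem.Chars.splitOn.go]
        simp only [hpre, if_true]
        rw [show List.drop (['"'].length) ('"' :: rest) = rest from rfl]
        rw [ih f [] (cur.reverse :: acc) (by simp at hf ⊢; omega)]
        rcases h : pvSplit rest with _ | ⟨p, ps⟩
        · exact absurd h (pvSplit_ne_nil rest)
        · simp [pvSplit, h]
      · have hpre : List.isPrefixOf ['"'] (c :: rest) = false := by
          simp [List.isPrefixOf]; exact fun h => absurd h.symm hc
        rw [PySem.Chars.splitOn.go]
        simp only [hpre]
        rw [if_neg (by simp [hc])]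
        rw [ih f (c :: cur) acc (by simp at hf ⊢; omega)]
        rcases h : pvSplit rest with _ | ⟨p, ps⟩
        · exact absurd h (pvSplit_ne_nil rest)
        · simp [pvSplit, hc, h]

theorem pvSplitOn_eq (l : List Char) : PySem.Chars.splitOn l ['"'] = pvSplit l := by
  rw [PySem.Chars.splitOn, pvSplitOn_go l (l.length + 1) [] [] (by omega)]
  rcases h : pvSplit l with _ | ⟨p, ps⟩
  · exact absurd h (pvSplit_ne_nil l)
  · simp

-- running the backslash counter through a segment
def pvRun (bs : Nat) : List Char → Nat
  | [] => bs
  | c :: t => pvRun (if c = '\\' then bs + 1 else 0) t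

theorem takeWhile_append_all {p : Char → Bool} {xs ys : List Char}
    (h : ∀ x ∈ xs, p x = true) : (xs ++ ys).takeWhile p = xs ++ ys.takeWhile p := by
  induction xs with
  | nil => rfl
  | cons a t ih =>
    simp only [List.cons_append, List.takeWhile_cons, h a (by simp), if_true]
    rw [ih (fun x hx => h x (by simp [hx]))]

theorem takeWhile_append_not_all {p : Char → Bool} {xs ys : List Char}
    (h : ∃ x ∈ xs, p x = false) : (xs ++ ys).takeWhile p = xs.takeWhile p := by
  induction xs with
  | nil => simp at h
  | cons a t ih =>
    by_cases ha : p a = true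
    · simp only [List.cons_append, List.takeWhile_cons, ha, if_true]
      rcases h with ⟨x, hx, hpx⟩
      rcases List.mem_cons.mp hx with rfl | hxt
      · rw [ha] at hpx; cases hpx
      · rw [ih ⟨x, hxt, hpx⟩]
    · simp only [List.cons_append, List.takeWhile_cons, ha]
      simp [Bool.eq_false_iff.mpr ha]

theorem pvRun_eq (seg : List Char) : ∀ bs : Nat,
    pvRun bs seg = if ∀ c ∈ seg, c = '\\' then bs + seg.length else pvTrailBS seg := by
  induction seg with
  | nil => intro bs; simp [pvRun]
  | cons c t ih =>
    intro bs
    by_cases ht : ∀ x ∈ t, x = '\\'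
    · by_cases hc : c = '\\'
      · subst hc
        have hall : ∀ x ∈ '\\' :: t, x = '\\' := by
          intro x hx; rcases List.mem_cons.mp hx with rfl | h
          · rfl
          · exact ht x h
        rw [pvRun, if_pos rfl, ih, if_pos ht, if_pos hall]
        simp; omega
      · have hnot : ¬ ∀ x ∈ c :: t, x = '\\' := fun h => hc (h c (by simp))
        rw [pvRun, if_neg hc, ih, if_pos ht, if_neg hnot]
        unfold pvTrailBS
        rw [List.reverse_cons, takeWhile_append_all
          (by intro x hx; simp only [List.mem_reverse] at hx; simp [ht x hx])]
        simp [hc]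
    · have hnot : ¬ ∀ x ∈ c :: t, x = '\\' := fun h => ht (fun x hx => h x (by simp [hx]))
      rw [pvRun, ih, if_neg ht, if_neg hnot]
      unfold pvTrailBS
      rw [List.reverse_cons, takeWhile_append_not_all]
      push Not at ht
      rcases ht with ⟨x, hx, hpx⟩
      exact ⟨x, List.mem_reverse.mpr hx, by simp [hpx]⟩

theorem pvRun_zero (seg : List Char) : pvRun 0 seg = pvTrailBS seg := by
  rw [pvRun_eq]
  split
  · next h =>
    unfold pvTrailBS
    rw [List.takeWhile_eq_self_iff.mpr (by intro x hx; simp; exact h x (List.mem_reverse.mp hx))]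
    simp
  · rfl

-- pvBLoop passes straight through a quote-free segment, accumulating the backslash run
theorem pvBLoop_seg (seg : List Char) : ∀ (l' : List Char) (bs : Nat) (q : Bool),
    (∀ c ∈ seg, c ≠ '"') →
    pvBLoop (seg ++ l') bs q
      = ((seg ++ (pvBLoop l' (pvRun bs seg) q).1), (pvBLoop l' (pvRun bs seg) q).2) := by
  induction seg with
  | nil => intro l' bs q _; simp [pvRun]
  | cons c t ih =>
    intro l' bs q h
    have hc : c ≠ '"' := h c (by simp)
    simp only [List.cons_append, pvBLoop]
    rw [if_neg (by simp [hc])]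
    rw [ih l' (if c = '\\' then bs + 1 else 0) q (fun x hx => h x (by simp [hx]))]
    simp [pvRun]

-- inversion of pvSplit: a string is quote-free or starts with a quote-free segment then '"'
theorem pvSplit_cases (l : List Char) :
    ((∀ c ∈ l, c ≠ '"') ∧ pvSplit l = [l]) ∨
    (∃ p0 l', l = p0 ++ '"' :: l' ∧ (∀ c ∈ p0, c ≠ '"') ∧ pvSplit l = p0 :: pvSplit l') := by
  induction l with
  | nil => exact Or.inl ⟨by simp, rfl⟩
  | cons c rest ih =>
    by_cases hc : c = '"'
    · subst hc
      exact Or.inr ⟨[], rest, by simp, by simp, by simp [pvSplit]⟩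
    · rcases ih with ⟨hf, hs⟩ | ⟨p0, l', heq, hf, hs⟩
      · refine Or.inl ⟨?_, ?_⟩
        · intro x hx; rcases List.mem_cons.mp hx with rfl | h
          · exact hc
          · exact hf x h
        · simp [pvSplit, hc, hs]
      · refine Or.inr ⟨c :: p0, l', by simp [heq], ?_, ?_⟩
        · intro x hx; rcases List.mem_cons.mp hx with rfl | h
          · exact hc
          · exact hf x h
        · simp [pvSplit, hc, hs]

-- the single pass equals the segment walk over pvSplit
theorem pvBLoop_eq_parts : ∀ (n : Nat) (l : List Char) (q : Bool), l.length ≤ n →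
    pvBLoop l 0 q = (match pvSplit l with
      | [] => ([], q)
      | p0 :: segs => ((p0 ++ (pvBParts p0 segs q).1), (pvBParts p0 segs q).2)) := by
  intro n
  induction n with
  | zero =>
    intro l q hl
    have : l = [] := List.length_eq_zero_iff.mp (Nat.le_zero.mp hl)
    subst this
    simp [pvBLoop, pvSplit, pvBParts]
  | succ n ih =>
    intro l q hl
    rcases pvSplit_cases l with ⟨hf, hs⟩ | ⟨p0, l', heq, hf, hs⟩
    · rw [hs]
      have hseg := pvBLoop_seg l [] 0 q hf
      simp only [List.append_nil] at hseg
      simp [hseg, pvBLoop, pvBParts]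
    · subst heq
      rw [hs]
      have hlen : l'.length ≤ n := by
        simp only [List.length_append, List.length_cons] at hl; omega
    -- skip the quote-free prefix p0, then handle the quote, then recurse
      rw [pvBLoop_seg p0 ('"' :: l') 0 q hf, pvRun_zero]
      rcases hsp : pvSplit l' with _ | ⟨p1, segs⟩
      · exact absurd hsp (pvSplit_ne_nil l')
      · by_cases hodd : pvTrailBS p0 % 2 = 1
        · have heven : ¬ ('"' = '"' ∧ pvTrailBS p0 % 2 = 0) := by
            rintro ⟨-, h⟩; omega
          rw [pvBLoop, if_neg heven]
          have := ih l' q hlen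
          rw [hsp] at this
          simp [this, pvBParts, hodd]
        · have heven : ('"' = '"' ∧ pvTrailBS p0 % 2 = 0) := ⟨rfl, by omega⟩
          rw [pvBLoop, if_pos heven]
          have := ih l' (!q) hlen
          rw [hsp] at this
          simp [this, pvBParts, hodd]

theorem pvLoop_agree (full : List Char) :
    ∀ (rest : List Char) (i : Nat) (q : Bool), full.drop i = rest →
      pvALoop full rest i q = pvBLoop rest (pvBackslashRun full i) q := by
  intro rest
  induction rest with
  | nil => intro i q _; simp [pvALoop, pvBLoop]
  | cons ch rest ih =>
    intro i q hdrop
    have hi : i < full.length := by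
      by_contra h
      simp [List.drop_eq_nil_of_le (Nat.le_of_not_lt h)] at hdrop
    have hget : full[i]? = some ch := by
      have := congrArg (fun l => l[0]?) hdrop
      simpa [List.getElem?_drop] using this
    have hdrop' : List.drop (i + 1) full = rest := by
      have := congrArg (List.drop 1) hdrop
      simpa [List.drop_drop, Nat.add_comm] using this
    have hrun : pvBackslashRun full (i + 1)
        = if ch == '\\' then pvBackslashRun full i + 1 else 0 := by
      simp [pvBackslashRun, List.getD, hget]
    simp only [pvALoop, pvBLoop, pvIsEscaped]
    by_cases hq : ch = '"'
    · subst hq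
      by_cases hp : pvBackslashRun full i % 2 = 0
      · simp [hp, ih (i + 1) (!q) hdrop', hrun]
      · have h1 : pvBackslashRun full i % 2 = 1 := by omega
        simp [hp, h1, ih (i + 1) q hdrop', hrun]
    · simp [hq, ih (i + 1) q hdrop', hrun]

-- ===== VERDICT (by name: the statement is the Claim_ definition above) =====
theorem convert_quotes_in_plain_text_spec : Claim_equal_convert_quotes_in_plain_text := by
  intro text q _
  unfold Spec_convert_quotes_in_plain_text convert_quotes_in_plain_text convert_quotes_in_plain_text_alt
  rw [pvLoop_agree text.toList text.toList 0 q (by simp)]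
  have hb : pvBackslashRun text.toList 0 = 0 := rfl
  rw [hb, pvBLoop_eq_parts text.toList.length text.toList q le_rfl, pvSplitOn_eq]
  rcases h : pvSplit text.toList with _ | ⟨p0, segs⟩
  · exact absurd h (pvSplit_ne_nil _)
  · simp
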